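-- pv_equiv track=rewrite | github.com/licekto/challenges | advent-of-code/2024/python/advent_of_code/day_08.py | get_harmonics
-- ===== SOURCE A (Python) =====
-- def is_on_map(m, x, y):
--     return x in range(len(m[0])) and y in range(len(m))
--
-- def get_harmonics(m, a1, a2):
--     xd, yd = a1[0] - a2[0], a1[1] - a2[1]
--
--     harmonics = set()
--     harmonics.add((a1[0], a1[1]))
--     harmonics.add((a2[0], a2[1]))
--
--     x, y = a1[0] + xd, a1[1] + yd
--     while is_on_map(m, x, y):
--         harmonics.add((x, y))
--         x += xd
--         y += yd
--
--     x, y = a2[0] - xd, a2[1] - yd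
--     while is_on_map(m, x, y):
--         harmonics.add((x, y))
--         x -= xd
--         y -= yd
--
--     return harmonics
-- ===== SOURCE B (Python) =====
-- def _max_steps(p, e, w):
--     # Largest n >= 0 with p + k*e in [0, w) for every k = 1..n (None = unbounded).
--     if e == 0:
--         return None if 0 <= p < w else 0
--     if e < 0:
--         p, e = w - 1 - p, -e
--     if not (0 <= p + e < w):
--         return 0
--     return (w - 1 - p) // e
--
--
-- def _steps(x, y, ex, ey, w, h):
--     nx = _max_steps(x, ex, w)
--     ny = _max_steps(y, ey, h)
--     if nx is None:
--         return ny
--     if ny is None: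
--         return nx
--     return min(nx, ny)
--
--
-- def get_harmonics(m, a1, a2):
--     xd, yd = a1[0] - a2[0], a1[1] - a2[1]
--     w, h = len(m[0]), len(m)
--     harmonics = {(a1[0], a1[1]), (a2[0], a2[1])}
--     if xd == 0 and yd == 0:
--         return harmonics
--     n1 = _steps(a1[0], a1[1], xd, yd, w, h)
--     for k in range(1, n1 + 1):
--         harmonics.add((a1[0] + k * xd, a1[1] + k * yd))
--     n2 = _steps(a2[0], a2[1], -xd, -yd, w, h)
--     for k in range(1, n2 + 1):
--         harmonics.add((a2[0] - k * xd, a2[1] - k * yd))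
--     return harmonics
-- ===== Notes on version B (the rewrite author's own statement) =====
-- stated objective: alternative
-- what changed: B replaces A's two step-by-step while-walks (test each cell, advance) with a closed-form floor-division computation of how many steps of each ray stay on the map, then emits the ray points directly from that count; same output-bound cost since both materialise every ray point.
import Mathlib
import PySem

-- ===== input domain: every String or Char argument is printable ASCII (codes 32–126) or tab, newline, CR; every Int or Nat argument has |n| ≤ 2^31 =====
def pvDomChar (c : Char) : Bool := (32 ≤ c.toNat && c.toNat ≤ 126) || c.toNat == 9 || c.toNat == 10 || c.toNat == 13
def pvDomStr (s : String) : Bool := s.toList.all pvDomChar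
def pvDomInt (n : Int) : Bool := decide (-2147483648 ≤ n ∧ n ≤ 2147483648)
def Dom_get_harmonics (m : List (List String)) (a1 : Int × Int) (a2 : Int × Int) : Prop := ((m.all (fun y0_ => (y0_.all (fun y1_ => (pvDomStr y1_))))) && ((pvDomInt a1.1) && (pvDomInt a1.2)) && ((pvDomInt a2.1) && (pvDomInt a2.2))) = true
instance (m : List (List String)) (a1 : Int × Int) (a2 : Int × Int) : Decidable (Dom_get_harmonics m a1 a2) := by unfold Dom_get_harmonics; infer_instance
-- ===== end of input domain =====

-- B computes each ray's on-map step count in closed form (floor division) instead of A's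
-- step-by-step walks; proved equal on Pre_ (A raises on m = [] and loops forever when a1 = a2 on the map).

-- ===== PORT A =====
-- is_on_map: 'x in range(len(m[0]))' — m[0] raises IndexError on m = []; Pre_ requires m ≠ [],
-- so 'm.headD []' is exact on every admitted input.
def is_on_map (m : List (List String)) (x y : Int) : Bool :=
  decide (0 ≤ x ∧ x < ((m.headD []).length : Int) ∧ 0 ≤ y ∧ y < (m.length : Int))

-- the while loop; fuel only makes it total (under Pre_ the walk stops before fuel runs out)
def ghLoop (m : List (List String)) (xd yd : Int) : Nat → PySem.Set (Int × Int) → Int → Int → PySem.Set (Int × Int)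
  | 0, s, _, _ => s
  | fuel+1, s, x, y =>
      if is_on_map m x y then ghLoop m xd yd fuel (PySem.Set.add s (x, y)) (x + xd) (y + yd) else s

def get_harmonics (m : List (List String)) (a1 : Int × Int) (a2 : Int × Int) : List (Int × Int) :=
  let xd := a1.1 - a2.1
  let yd := a1.2 - a2.2
  let s0 := PySem.Set.add (PySem.Set.add PySem.Set.empty (a1.1, a1.2)) (a2.1, a2.2)
  let fuel := (m.headD []).length + m.length + 1
  let s1 := ghLoop m xd yd fuel s0 (a1.1 + xd) (a1.2 + yd)
  ghLoop m (-xd) (-yd) fuel s1 (a2.1 - xd) (a2.2 - yd)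

-- ===== PORT B =====
-- largest n ≥ 0 with p + k*e ∈ [0, w) for every k = 1..n (none = unbounded)
def max_steps (p e w : Int) : Option Int :=
  if e = 0 then (if 0 ≤ p ∧ p < w then none else some 0)
  else
    let p' := if e < 0 then w - 1 - p else p
    let e' := if e < 0 then -e else e
    if ¬ (0 ≤ p' + e' ∧ p' + e' < w) then some 0
    else some (PySem.Int.floordiv (w - 1 - p') e')

def steps (x y ex ey w h : Int) : Int :=
  match max_steps x ex w, max_steps y ey h with
  | none, none => 0   -- unreachable: the caller returns earlier when ex = ey = 0
  | none, some ny => ny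
  | some nx, none => nx
  | some nx, some ny => min nx ny

def get_harmonics_alt (m : List (List String)) (a1 : Int × Int) (a2 : Int × Int) : List (Int × Int) :=
  let xd := a1.1 - a2.1
  let yd := a1.2 - a2.2
  let w : Int := (m.headD []).length
  let h : Int := m.length
  let s := PySem.Set.ofList [(a1.1, a1.2), (a2.1, a2.2)]
  if xd = 0 ∧ yd = 0 then s
  else
    let n1 := steps a1.1 a1.2 xd yd w h
    let s1 := (PySem.List.pyRange 1 (n1 + 1) 1).foldl
      (fun s k => PySem.Set.add s (a1.1 + k * xd, a1.2 + k * yd)) s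
    let n2 := steps a2.1 a2.2 (-xd) (-yd) w h
    (PySem.List.pyRange 1 (n2 + 1) 1).foldl
      (fun s k => PySem.Set.add s (a2.1 - k * xd, a2.2 - k * yd)) s1

-- ===== PRECONDITION & SPEC =====
-- Pre_ excludes m = [] (A raises IndexError on len(m[0])) and a1 = a2 lying on the map
-- (A's while loop never terminates there); A returns on every other input.
def Pre_get_harmonics (m : List (List String)) (a1 : Int × Int) (a2 : Int × Int) : Prop :=
  m ≠ [] ∧
  ¬ (a1 = a2 ∧ 0 ≤ a1.1 ∧ a1.1 < ((m.headD []).length : Int) ∧ 0 ≤ a1.2 ∧ a1.2 < (m.length : Int))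
instance (m : List (List String)) (a1 : Int × Int) (a2 : Int × Int) : Decidable (Pre_get_harmonics m a1 a2) := by unfold Pre_get_harmonics; infer_instance

def pvWitness_get_harmonics : List (List String) × (Int × Int) × (Int × Int) :=
  ([[".", ".", "."], [".", ".", "."], [".", ".", "."]], (0, 0), (1, 1))

def Spec_get_harmonics (m : List (List String)) (a1 : Int × Int) (a2 : Int × Int) (out : List (Int × Int)) : Prop := out = get_harmonics_alt m a1 a2
instance (m : List (List String)) (a1 : Int × Int) (a2 : Int × Int) (out : List (Int × Int)) : Decidable (Spec_get_harmonics m a1 a2 out) := by unfold Spec_get_harmonics; infer_instance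

-- ===== CLAIM (what is proved, stated in full; the proofs are below) =====
def Claim_equal_get_harmonics : Prop := ∀ (m : List (List String)) (a1 : Int × Int) (a2 : Int × Int), Dom_get_harmonics m a1 a2 → Pre_get_harmonics m a1 a2 → Spec_get_harmonics m a1 a2 (get_harmonics m a1 a2)

-- ===== LEMMAS AND PROOFS =====

theorem is_on_map_iff (m : List (List String)) (x y : Int) :
    is_on_map m x y = true ↔
      (0 ≤ x ∧ x < ((m.headD []).length : Int)) ∧ (0 ≤ y ∧ y < (m.length : Int)) := by
  simp [is_on_map]; tauto

theorem is_on_map_eq_false_iff (m : List (List String)) (x y : Int) :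
    is_on_map m x y = false ↔
      ¬ ((0 ≤ x ∧ x < ((m.headD []).length : Int)) ∧ (0 ≤ y ∧ y < (m.length : Int))) := by
  rw [← Bool.not_eq_true, is_on_map_iff]

theorem ghLoop_off (m : List (List String)) (xd yd : Int) (fuel : Nat)
    (s : PySem.Set (Int × Int)) (x y : Int) (h : is_on_map m x y = false) :
    ghLoop m xd yd fuel s x y = s := by
  cases fuel <;> simp [ghLoop, h]

theorem max_steps_none (p e w : Int) (h : max_steps p e w = none) :
    ∀ k : Int, 0 ≤ p + k * e ∧ p + k * e < w := by
  intro k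
  unfold max_steps at h
  by_cases h1 : e = 0
  · simp [h1] at h; subst h1; simpa using h
  · simp only [h1, if_false] at h; split_ifs at h

theorem max_steps_pos (p e w : Int) (hw : 0 ≤ w) (he : 0 < e) :
    let n := if ¬ (0 ≤ p + e ∧ p + e < w) then 0 else PySem.Int.floordiv (w - 1 - p) e
    0 ≤ n ∧ (∀ k : Int, 1 ≤ k → k ≤ n → 0 ≤ p + k * e ∧ p + k * e < w) ∧
      ¬ (0 ≤ p + (n + 1) * e ∧ p + (n + 1) * e < w) ∧ n ≤ w := by
  intro n
  by_cases hin : 0 ≤ p + e ∧ p + e < w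
  · have hn : n = PySem.Int.floordiv (w - 1 - p) e := by simp [n, hin]
    rw [hn]
    set q := PySem.Int.floordiv (w - 1 - p) e with hq
    have hub : ∀ k : Int, k ≤ q → k * e ≤ w - 1 - p := fun k hk =>
      (PySem.Int.le_floordiv_iff_mul_le he).mp (le_trans hk (le_refl q))
    have hfail : w - 1 - p < (q + 1) * e :=
      (PySem.Int.floordiv_lt_iff_lt_mul he).mp (by omega)
    have hq1 : 1 ≤ q := (PySem.Int.le_floordiv_iff_mul_le he).mpr (by omega)
    refine ⟨by omega, ?_, by omega, ?_⟩
    · intro k hk1 hkq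
      have h1 : k * e ≤ w - 1 - p := hub k hkq
      have h2 : e ≤ k * e := le_mul_of_one_le_left he.le hk1
      omega
    · by_contra hqw
      rw [not_le] at hqw
      have h1 : (w + 1) * e ≤ w - 1 - p := hub (w + 1) (by omega)
      nlinarith
  · have hn : n = 0 := by simp [n, hin]
    rw [hn]
    refine ⟨le_refl 0, fun k hk1 hk0 => by omega, by simpa using hin, hw⟩

theorem max_steps_some (p e w n : Int) (hw : 0 ≤ w) (h : max_steps p e w = some n) :
    0 ≤ n ∧ (∀ k : Int, 1 ≤ k → k ≤ n → 0 ≤ p + k * e ∧ p + k * e < w) ∧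
      ¬ (0 ≤ p + (n + 1) * e ∧ p + (n + 1) * e < w) ∧ n ≤ w := by
  by_cases h0 : e = 0
  · subst h0
    unfold max_steps at h
    simp at h
    obtain ⟨hp, hn⟩ := h
    subst hn
    refine ⟨le_refl 0, fun k hk1 hk0 => by omega, by simpa using hp, hw⟩
  · by_cases hneg : e < 0
    · have he' : 0 < -e := by omega
      have H := max_steps_pos (w - 1 - p) (-e) w hw he'
      set n' := if ¬ (0 ≤ (w - 1 - p) + (-e) ∧ (w - 1 - p) + (-e) < w) then 0
        else PySem.Int.floordiv (w - 1 - (w - 1 - p)) (-e) with hn'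
      have hval : n = n' := by
        unfold max_steps at h
        simp only [h0, if_false, hneg, if_true] at h
        rw [hn']
        split_ifs at h ⊢ with hc
        · injection h with h; omega
        · injection h with h; subst h; congr 1
      rw [hval]
      obtain ⟨H0, Hrange, Hfail, Hbound⟩ := H
      refine ⟨H0, ?_, ?_, Hbound⟩
      · intro k hk1 hk2
        have hh := Hrange k hk1 hk2
        rw [show w - 1 - p + k * -e = w - 1 - (p + k * e) by ring] at hh
        omega
      · intro hcon
        apply Hfail
        rw [show w - 1 - p + (n' + 1) * -e = w - 1 - (p + (n' + 1) * e) by ring]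
        omega
    · have he : 0 < e := by omega
      have H := max_steps_pos p e w hw he
      have hval : n = (if ¬ (0 ≤ p + e ∧ p + e < w) then 0 else PySem.Int.floordiv (w - 1 - p) e) := by
        unfold max_steps at h
        simp only [h0, if_false, hneg] at h
        split_ifs at h ⊢ with hc
        · injection h with h; omega
        · injection h with h; exact h.symm
      rw [hval]
      exact H

theorem steps_spec (x y ex ey w h : Int) (hw : 0 ≤ w) (hh : 0 ≤ h)
    (hd : ¬ (ex = 0 ∧ ey = 0)) :
    0 ≤ steps x y ex ey w h ∧
    (∀ k : Int, 1 ≤ k → k ≤ steps x y ex ey w h →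
      (0 ≤ x + k * ex ∧ x + k * ex < w) ∧ (0 ≤ y + k * ey ∧ y + k * ey < h)) ∧
    ¬ ((0 ≤ x + (steps x y ex ey w h + 1) * ex ∧ x + (steps x y ex ey w h + 1) * ex < w) ∧
       (0 ≤ y + (steps x y ex ey w h + 1) * ey ∧ y + (steps x y ex ey w h + 1) * ey < h)) ∧
    steps x y ex ey w h ≤ w + h := by
  unfold steps
  rcases hx : max_steps x ex w with _ | nx <;> rcases hy : max_steps y ey h with _ | ny
  · exfalso
    have h1 := max_steps_none x ex w hx
    have h2 := max_steps_none y ey h hy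
    -- both none forces ex = 0 ∧ ey = 0
    unfold max_steps at hx hy
    by_cases e1 : ex = 0
    · by_cases e2 : ey = 0
      · exact hd ⟨e1, e2⟩
      · simp only [e2, if_false] at hy; split_ifs at hy
    · simp only [e1, if_false] at hx; split_ifs at hx
  · simp only []
    obtain ⟨H0, Hr, Hf, Hb⟩ := max_steps_some y ey h ny hh hy
    have Hx := max_steps_none x ex w hx
    exact ⟨H0, fun k hk1 hk2 => ⟨Hx k, Hr k hk1 hk2⟩, fun hcon => Hf hcon.2, by omega⟩
  · simp only []
    obtain ⟨H0, Hr, Hf, Hb⟩ := max_steps_some x ex w nx hw hx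
    have Hy := max_steps_none y ey h hy
    exact ⟨H0, fun k hk1 hk2 => ⟨Hr k hk1 hk2, Hy k⟩, fun hcon => Hf hcon.1, by omega⟩
  · simp only []
    obtain ⟨H0x, Hrx, Hfx, Hbx⟩ := max_steps_some x ex w nx hw hx
    obtain ⟨H0y, Hry, Hfy, Hby⟩ := max_steps_some y ey h ny hh hy
    refine ⟨le_min H0x H0y, fun k hk1 hk2 => ⟨Hrx k hk1 (le_trans hk2 (min_le_left _ _)), Hry k hk1 (le_trans hk2 (min_le_right _ _))⟩, ?_, by omega⟩
    intro hcon
    rcases le_total nx ny with hmin | hmin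
    · rw [min_eq_left hmin] at hcon; exact Hfx hcon.1
    · rw [min_eq_right hmin] at hcon; exact Hfy hcon.2

theorem ghLoop_bridge (m : List (List String)) (xd yd : Int) (N : Nat) :
    ∀ (x0 y0 : Int) (fuel : Nat) (s : PySem.Set (Int × Int)),
    (∀ k : Int, 1 ≤ k → k ≤ (N : Int) → is_on_map m (x0 + k * xd) (y0 + k * yd) = true) →
    is_on_map m (x0 + ((N : Int) + 1) * xd) (y0 + ((N : Int) + 1) * yd) = false →
    N ≤ fuel →
    ghLoop m xd yd fuel s (x0 + xd) (y0 + yd) =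
      (PySem.List.pyRange 1 ((N : Int) + 1) 1).foldl
        (fun s k => PySem.Set.add s (x0 + k * xd, y0 + k * yd)) s := by
  induction N with
  | zero =>
    intro x0 y0 fuel s _ hfail _
    rw [PySem.List.pyRange_one_eq_nil (by omega)]
    simp only [List.foldl_nil]
    have hf : is_on_map m (x0 + xd) (y0 + yd) = false := by
      simpa using hfail
    cases fuel <;> simp [ghLoop, hf]
  | succ N ih =>
    intro x0 y0 fuel s hon hfail hfuel
    obtain ⟨f, rfl⟩ : ∃ f, fuel = f + 1 := ⟨fuel - 1, by omega⟩
    have h1 : is_on_map m (x0 + xd) (y0 + yd) = true := by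
      have := hon 1 le_rfl (by push_cast; omega)
      simpa using this
    rw [ghLoop, h1, if_pos rfl]
    have harg : ((N + 1 : Nat) : Int) + 1 = (N : Int) + 2 := by push_cast; ring
    rw [harg, PySem.List.pyRange_one_cons (by omega), List.foldl_cons]
    simp only [one_mul]
    have hon' : ∀ k : Int, 1 ≤ k → k ≤ (N : Int) →
        is_on_map m ((x0 + xd) + k * xd) ((y0 + yd) + k * yd) = true := by
      intro k hk1 hk2
      have hko := hon (k + 1) (by omega) (by push_cast; omega)
      rw [show x0 + (k + 1) * xd = (x0 + xd) + k * xd by ring,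
        show y0 + (k + 1) * yd = (y0 + yd) + k * yd by ring] at hko
      exact hko
    have hfail' : is_on_map m ((x0 + xd) + ((N : Int) + 1) * xd)
        ((y0 + yd) + ((N : Int) + 1) * yd) = false := by
      rw [show (x0 + xd) + ((N : Int) + 1) * xd = x0 + (((N + 1 : Nat) : Int) + 1) * xd by push_cast; ring,
        show (y0 + yd) + ((N : Int) + 1) * yd = y0 + (((N + 1 : Nat) : Int) + 1) * yd by push_cast; ring]
      exact hfail
    rw [show x0 + xd + xd = (x0 + xd) + xd by ring, show y0 + yd + yd = (y0 + yd) + yd by ring,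
      ih (x0 + xd) (y0 + yd) f (PySem.Set.add s (x0 + xd, y0 + yd)) hon' hfail' (by omega)]
    rw [PySem.List.pyRange_one, PySem.List.pyRange_one]
    rw [show ((N : Int) + 1 - 1).toNat = N by omega, show ((N : Int) + 2 - (1 + 1)).toNat = N by omega]
    rw [List.foldl_map, List.foldl_map]
    congr 1
    funext s k
    congr 1
    simp only [Prod.mk.injEq]
    constructor <;> push_cast <;> ring

-- ===== VERDICT (by name: the statement is the Claim_ definition above) =====
theorem get_harmonics_spec : Claim_equal_get_harmonics := by
  intro m a1 a2 _ hpre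
  obtain ⟨hm, hcorner⟩ := hpre
  unfold Spec_get_harmonics get_harmonics get_harmonics_alt
  dsimp only
  by_cases hd : a1.1 - a2.1 = 0 ∧ a1.2 - a2.2 = 0
  · -- a1 = a2: both walks start off the map (Pre_); both sides are the two seeds
    have ha : a1 = a2 := Prod.ext_iff.mpr (by omega)
    have hoff : ∀ x y : Int, x = a1.1 → y = a1.2 → is_on_map m x y = false := by
      intro x y hx hy; subst hx; subst hy
      rw [is_on_map_eq_false_iff]
      intro hin
      exact hcorner ⟨ha, hin.1.1, hin.1.2, hin.2.1, hin.2.2⟩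
    rw [if_pos hd]
    rw [ghLoop_off _ _ _ _ _ _ _ (hoff _ _ (by omega) (by omega)),
        ghLoop_off _ _ _ _ _ _ _ (hoff _ _ (by omega) (by omega))]
    rfl
  · rw [if_neg hd]
    have hw : (0 : Int) ≤ ((m.headD []).length : Int) := by positivity
    have hh : (0 : Int) ≤ (m.length : Int) := by positivity
    -- first ray, from a1
    obtain ⟨h10, h1r, h1f, h1b⟩ :=
      steps_spec a1.1 a1.2 (a1.1 - a2.1) (a1.2 - a2.2) ((m.headD []).length : Int)
        (m.length : Int) hw hh hd
    set n1 := steps a1.1 a1.2 (a1.1 - a2.1) (a1.2 - a2.2) ((m.headD []).length : Int)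
      (m.length : Int) with hn1
    have hN1 : ((n1.toNat : Int)) = n1 := Int.toNat_of_nonneg h10
    have hbr1 := ghLoop_bridge m (a1.1 - a2.1) (a1.2 - a2.2) n1.toNat a1.1 a1.2
      ((m.headD []).length + m.length + 1)
      (PySem.Set.add (PySem.Set.add PySem.Set.empty (a1.1, a1.2)) (a2.1, a2.2))
      (by intro k hk1 hk2
          rw [hN1] at hk2
          exact (is_on_map_iff m _ _).mpr (h1r k hk1 hk2))
      (by rw [is_on_map_eq_false_iff, hN1]; exact h1f)
      (by omega)
    rw [hN1] at hbr1
    rw [hbr1]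
    -- second ray, from a2 with step -d
    have hd' : ¬ (-(a1.1 - a2.1) = 0 ∧ -(a1.2 - a2.2) = 0) := by omega
    obtain ⟨h20, h2r, h2f, h2b⟩ :=
      steps_spec a2.1 a2.2 (-(a1.1 - a2.1)) (-(a1.2 - a2.2)) ((m.headD []).length : Int)
        (m.length : Int) hw hh hd'
    set n2 := steps a2.1 a2.2 (-(a1.1 - a2.1)) (-(a1.2 - a2.2)) ((m.headD []).length : Int)
      (m.length : Int) with hn2
    have hN2 : ((n2.toNat : Int)) = n2 := Int.toNat_of_nonneg h20
    have hbr2 := ghLoop_bridge m (-(a1.1 - a2.1)) (-(a1.2 - a2.2)) n2.toNat a2.1 a2.2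
      ((m.headD []).length + m.length + 1)
      ((PySem.List.pyRange 1 (n1 + 1) 1).foldl
        (fun s k => PySem.Set.add s (a1.1 + k * (a1.1 - a2.1), a1.2 + k * (a1.2 - a2.2)))
        (PySem.Set.add (PySem.Set.add PySem.Set.empty (a1.1, a1.2)) (a2.1, a2.2)))
      (by intro k hk1 hk2
          rw [hN2] at hk2
          exact (is_on_map_iff m _ _).mpr (h2r k hk1 hk2))
      (by rw [is_on_map_eq_false_iff, hN2]; exact h2f)
      (by omega)
    rw [hN2] at hbr2
    rw [show a2.1 - (a1.1 - a2.1) = a2.1 + -(a1.1 - a2.1) by ring,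
        show a2.2 - (a1.2 - a2.2) = a2.2 + -(a1.2 - a2.2) by ring, hbr2]
    congr 1
    funext s k
    congr 1
    simp only [Prod.mk.injEq]
    constructor <;> ring
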